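-- pv_equiv track=rewrite | github.com/mritterhoff/adventofcode | 2021/day19/solution2.py | getpermute
-- ===== SOURCE A (Python) =====
-- from collections import defaultdict, Counter
--
-- def roll(v): return (v[0],v[2],-v[1])
--
-- def turn(v): return (-v[1],v[0],v[2])
--
-- def sequence (v):
--     for cycle in range(2):
--         for step in range(3):  # Yield RTTT 3 times
--             v = roll(v)
--             yield(v)           #    Yield R
--             for i in range(3): #    Yield TTT
--                 v = turn(v)
--                 yield(v)
--         v = roll(turn(roll(v)))  # Do RTR
--
-- def getpermute(l):
-- 	out = defaultdict(list)
-- 	pgroups = []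
-- 	for row in l:
-- 		lps = [v for v in sequence(row)]
-- 		for i in range(len(lps)):
-- 			out[i].append(lps[i])
-- 	return out
-- ===== SOURCE B (Python) =====
-- from collections import defaultdict
--
-- # The 24 orientations of sequence() are fixed signed permutations of the input
-- # vector; precompute them once as (sign, index) triples and fill the dict
-- # index-major, one closed-form column per orientation (no generator at all).
-- _ORIENT = [
--     ((1, 0), (1, 2), (-1, 1)),
--     ((-1, 2), (1, 0), (-1, 1)),
--     ((-1, 0), (-1, 2), (-1, 1)),
--     ((1, 2), (-1, 0), (-1, 1)),
--     ((1, 2), (-1, 1), (1, 0)),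
--     ((1, 1), (1, 2), (1, 0)),
--     ((-1, 2), (1, 1), (1, 0)),
--     ((-1, 1), (-1, 2), (1, 0)),
--     ((-1, 1), (1, 0), (1, 2)),
--     ((-1, 0), (-1, 1), (1, 2)),
--     ((1, 1), (-1, 0), (1, 2)),
--     ((1, 0), (1, 1), (1, 2)),
--     ((-1, 2), (-1, 0), (1, 1)),
--     ((1, 0), (-1, 2), (1, 1)),
--     ((1, 2), (1, 0), (1, 1)),
--     ((-1, 0), (1, 2), (1, 1)),
--     ((-1, 0), (1, 1), (-1, 2)),
--     ((-1, 1), (-1, 0), (-1, 2)),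
--     ((1, 0), (-1, 1), (-1, 2)),
--     ((1, 1), (1, 0), (-1, 2)),
--     ((1, 1), (-1, 2), (-1, 0)),
--     ((1, 2), (1, 1), (-1, 0)),
--     ((-1, 1), (1, 2), (-1, 0)),
--     ((-1, 2), (-1, 1), (-1, 0)),
-- ]
--
-- def _apply(t, v):
--     return (t[0][0] * v[t[0][1]], t[1][0] * v[t[1][1]], t[2][0] * v[t[2][1]])
--
-- def getpermute(l):
--     out = defaultdict(list)
--     if l:
--         for i, t in enumerate(_ORIENT):
--             out[i] = [_apply(t, row) for row in l]
--     return out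
-- ===== Notes on version B (the rewrite author's own statement) =====
-- stated objective: alternative
-- what changed: A runs the roll/turn generator on every row and appends each of its 24 yields to the per-index dict lists; B derives no orientation incrementally at all: it precomputes the 24 orientations once as a fixed table of signed permutations and fills the dict index-major, assigning each index a closed-form column [apply(t_i, row) for row in l] in one step.
import Mathlib
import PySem

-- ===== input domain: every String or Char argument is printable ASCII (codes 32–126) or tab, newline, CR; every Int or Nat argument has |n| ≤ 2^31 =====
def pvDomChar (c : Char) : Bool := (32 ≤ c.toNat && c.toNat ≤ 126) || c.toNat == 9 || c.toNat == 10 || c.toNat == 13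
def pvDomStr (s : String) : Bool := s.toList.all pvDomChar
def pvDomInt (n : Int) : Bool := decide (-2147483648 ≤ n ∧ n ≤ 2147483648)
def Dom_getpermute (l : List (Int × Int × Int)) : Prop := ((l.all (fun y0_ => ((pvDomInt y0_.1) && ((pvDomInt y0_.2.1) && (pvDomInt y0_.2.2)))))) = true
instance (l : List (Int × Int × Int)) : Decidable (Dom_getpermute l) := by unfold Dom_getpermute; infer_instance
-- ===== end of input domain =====

-- B replaces A's roll/turn generator entirely by a precomputed table of the 24 fixed
-- signed permutations and fills the dict index-major, one column per orientation;
-- objective: alternative algorithm (closed-form transform table vs incremental generator).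

-- ===== PORT A =====
-- roll(v)
def pvRoll (v : Int × Int × Int) : Int × Int × Int := (v.1, v.2.2, -v.2.1)
-- turn(v)
def pvTurn (v : Int × Int × Int) : Int × Int × Int := (-v.2.1, v.1, v.2.2)
-- list(sequence(v)): the generator ported as the list of yielded values, threading the
-- state (current v, yielded-so-far) through the three nested range loops
def pvSeq (v0 : Int × Int × Int) : List (Int × Int × Int) :=
  ((PySem.List.pyRange 0 2 1).foldl (fun st _cycle =>
      let st1 := (PySem.List.pyRange 0 3 1).foldl (fun st _step =>
          let v := pvRoll st.1
          let st := (v, st.2 ++ [v])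
          (PySem.List.pyRange 0 3 1).foldl (fun st _i =>
              let w := pvTurn st.1
              (w, st.2 ++ [w])) st) st
      (pvRoll (pvTurn (pvRoll st1.1)), st1.2)) (v0, ([] : List (Int × Int × Int)))).2

-- out[i].append(lps[i]) on a defaultdict(list) = modify key i with default [];
-- A's local 'pgroups = []' is never used and is omitted
def getpermute (l : List (Int × Int × Int)) : List (Int × List (Int × Int × Int)) :=
  (l.foldl (fun d row =>
      let lps := pvSeq row
      (PySem.List.pyRange 0 (PySem.List.len lps) 1).foldl
        (fun d i => d.modify i [] (fun xs => xs ++ [PySem.List.pyGetD lps i (0, 0, 0)])) d)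
    (PySem.Dict.empty : PySem.Dict Int (List (Int × Int × Int)))).items

-- ===== PORT B =====
-- the _ORIENT table of Source B: 24 signed permutations as ((sign, index), …) triples
def pvOrient : List ((Int × Nat) × (Int × Nat) × (Int × Nat)) :=
  [ ((1, 0), (1, 2), (-1, 1)),
    ((-1, 2), (1, 0), (-1, 1)),
    ((-1, 0), (-1, 2), (-1, 1)),
    ((1, 2), (-1, 0), (-1, 1)),
    ((1, 2), (-1, 1), (1, 0)),
    ((1, 1), (1, 2), (1, 0)),
    ((-1, 2), (1, 1), (1, 0)),
    ((-1, 1), (-1, 2), (1, 0)),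
    ((-1, 1), (1, 0), (1, 2)),
    ((-1, 0), (-1, 1), (1, 2)),
    ((1, 1), (-1, 0), (1, 2)),
    ((1, 0), (1, 1), (1, 2)),
    ((-1, 2), (-1, 0), (1, 1)),
    ((1, 0), (-1, 2), (1, 1)),
    ((1, 2), (1, 0), (1, 1)),
    ((-1, 0), (1, 2), (1, 1)),
    ((-1, 0), (1, 1), (-1, 2)),
    ((-1, 1), (-1, 0), (-1, 2)),
    ((1, 0), (-1, 1), (-1, 2)),
    ((1, 1), (1, 0), (-1, 2)),
    ((1, 1), (-1, 2), (-1, 0)),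
    ((1, 2), (1, 1), (-1, 0)),
    ((-1, 1), (1, 2), (-1, 0)),
    ((-1, 2), (-1, 1), (-1, 0)) ]

-- v[k] for k ∈ {0,1,2} on the tuple
def pvComp (v : Int × Int × Int) (k : Nat) : Int :=
  match k with
  | 0 => v.1
  | 1 => v.2.1
  | _ => v.2.2

-- _apply(t, v)
def pvApply (t : (Int × Nat) × (Int × Nat) × (Int × Nat)) (v : Int × Int × Int) : Int × Int × Int :=
  (t.1.1 * pvComp v t.1.2, t.2.1.1 * pvComp v t.2.1.2, t.2.2.1 * pvComp v t.2.2.2)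

def getpermute_alt (l : List (Int × Int × Int)) : List (Int × List (Int × Int × Int)) :=
  (if l ≠ [] then
      (PySem.List.enumerate pvOrient 0).foldl
        (fun d p => d.insert p.1 (l.map (fun row => pvApply p.2 row)))
        (PySem.Dict.empty : PySem.Dict Int (List (Int × Int × Int)))
    else PySem.Dict.empty).items

-- ===== PRECONDITION & SPEC =====
def Spec_getpermute (l : List (Int × Int × Int)) (out : List (Int × List (Int × Int × Int))) : Prop := out = getpermute_alt l
instance (l : List (Int × Int × Int)) (out : List (Int × List (Int × Int × Int))) : Decidable (Spec_getpermute l out) := by unfold Spec_getpermute; infer_instance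

-- ===== CLAIM (what is proved, stated in full; the proofs are below) =====
def Claim_equal_getpermute : Prop := ∀ (l : List (Int × Int × Int)), Dom_getpermute l → Spec_getpermute l (getpermute l)

-- ===== LEMMAS AND PROOFS =====

-- the common closed form both ports are reduced to
def pvCols (l : List (Int × Int × Int)) (i : Nat) : List (Int × Int × Int) :=
  l.map (fun r => (pvSeq r).getD i (0, 0, 0))

def pvCanon (l : List (Int × Int × Int)) : List (Int × List (Int × Int × Int)) :=
  if l = [] then [] else (List.range 24).map (fun (i : Nat) => ((i : Int), pvCols l i))

theorem pvSeq_length (v : Int × Int × Int) : (pvSeq v).length = 24 := by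
  obtain ⟨a, b, c⟩ := v
  simp [pvSeq, pvRoll, pvTurn, show PySem.List.pyRange 0 2 1 = [0, 1] from rfl,
        show PySem.List.pyRange 0 3 1 = [0, 1, 2] from rfl]

theorem pvSeq_len (v : Int × Int × Int) : PySem.List.len (pvSeq v) = 24 := by
  simp [PySem.List.len_eq, pvSeq_length]

theorem filter_beq_pyRange (n : Nat) (c : Int) :
    (PySem.List.pyRange 0 n 1).filter (fun i => i == c)
      = if 0 ≤ c ∧ c < (n : Int) then [c] else [] := by
  induction n with
  | zero =>
    rw [if_neg (by omega)]
    rfl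
  | succ m ih =>
    rw [show ((m + 1 : Nat) : Int) = (m : Int) + 1 by push_cast; ring,
        PySem.List.pyRange_one_succ_right (by positivity), List.filter_append, ih]
    by_cases hc : c = (m : Int)
    · subst hc
      rw [if_neg (by omega), if_pos (by omega), List.filter_singleton]
      simp only [beq_self_eq_true, cond_true, List.nil_append]
    · have : ((m : Int) == c) = false := by
        rw [beq_eq_false_iff_ne]; exact fun h => hc h.symm
      rw [List.filter_singleton, this]
      by_cases h0 : 0 ≤ c ∧ c < (m : Int)
      · rw [if_pos h0, if_pos (by omega)]
        simp only [cond_false, List.append_nil]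
      · rw [if_neg h0, if_neg (by omega)]
        simp only [cond_false, List.append_nil]

theorem getD_step (d : PySem.Dict Int (List (Int × Int × Int))) (row : Int × Int × Int) (c : Int) :
    ((PySem.List.pyRange 0 (PySem.List.len (pvSeq row)) 1).foldl
        (fun d i => d.modify i [] (fun xs => xs ++ [PySem.List.pyGetD (pvSeq row) i (0, 0, 0)])) d).getD c []
      = d.getD c [] ++ (if 0 ≤ c ∧ c < 24 then [PySem.List.pyGetD (pvSeq row) c (0, 0, 0)] else []) := by
  rw [pvSeq_len row]
  have hfold :
      (PySem.List.pyRange 0 24 1).foldl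
          (fun d i => d.modify i [] (fun xs => xs ++ [PySem.List.pyGetD (pvSeq row) i (0, 0, 0)])) d
        = ((PySem.List.pyRange 0 24 1).map
              (fun i => (i, PySem.List.pyGetD (pvSeq row) i (0, 0, 0)))).foldl
            (fun d p => d.modify p.1 [] (fun xs => xs ++ [p.2])) d := by
    rw [List.foldl_map]
  rw [hfold, PySem.Dict.getD_foldl_modify_append, List.filter_map]
  have hcomp : ((fun p : Int × (Int × Int × Int) => p.1 == c) ∘
        (fun i => (i, PySem.List.pyGetD (pvSeq row) i (0, 0, 0)))) = fun i => i == c := rfl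
  rw [hcomp, show (24 : Int) = ((24 : Nat) : Int) by norm_num, filter_beq_pyRange]
  by_cases h : 0 ≤ c ∧ c < ((24 : Nat) : Int)
  · rw [if_pos h, if_pos (by exact_mod_cast h)]
    rfl
  · rw [if_neg h, if_neg (by exact_mod_cast h)]
    rfl

theorem getD_foldl_A (l : List (Int × Int × Int)) (d : PySem.Dict Int (List (Int × Int × Int))) (c : Int) :
    (l.foldl (fun d row =>
        let lps := pvSeq row
        (PySem.List.pyRange 0 (PySem.List.len lps) 1).foldl
          (fun d i => d.modify i [] (fun xs => xs ++ [PySem.List.pyGetD lps i (0, 0, 0)])) d) d).getD c []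
      = d.getD c [] ++ (if 0 ≤ c ∧ c < 24 then l.map (fun r => PySem.List.pyGetD (pvSeq r) c (0, 0, 0)) else []) := by
  induction l generalizing d with
  | nil =>
    by_cases h : 0 ≤ c ∧ c < 24
    · rw [List.foldl_nil, if_pos h, List.map_nil, List.append_nil]
    · rw [List.foldl_nil, if_neg h, List.append_nil]
  | cons row rest ih =>
    rw [List.foldl_cons, ih, getD_step]
    by_cases h : 0 ≤ c ∧ c < 24
    · rw [if_pos h, if_pos h, if_pos h, List.map_cons, List.append_assoc]
      rfl
    · rw [if_neg h, if_neg h, if_neg h, List.append_nil, List.append_nil]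

theorem keys_step (d : PySem.Dict Int (List (Int × Int × Int))) (row : Int × Int × Int) :
    ((PySem.List.pyRange 0 (PySem.List.len (pvSeq row)) 1).foldl
        (fun d i => d.modify i [] (fun xs => xs ++ [PySem.List.pyGetD (pvSeq row) i (0, 0, 0)])) d).keys
      = PySem.Set.update d.keys (PySem.List.pyRange 0 24 1) := by
  rw [pvSeq_len row]
  exact PySem.Dict.keys_foldl_modify (PySem.List.pyRange 0 24 1) []
    (fun _ i => fun xs => xs ++ [PySem.List.pyGetD (pvSeq row) i (0, 0, 0)]) d

theorem keys_steps (l : List (Int × Int × Int)) (d : PySem.Dict Int (List (Int × Int × Int)))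
    (hd : d.keys = PySem.List.pyRange 0 24 1) :
    (l.foldl (fun d row =>
        let lps := pvSeq row
        (PySem.List.pyRange 0 (PySem.List.len lps) 1).foldl
          (fun d i => d.modify i [] (fun xs => xs ++ [PySem.List.pyGetD lps i (0, 0, 0)])) d) d).keys
      = PySem.List.pyRange 0 24 1 := by
  induction l generalizing d with
  | nil => exact hd
  | cons row rest ih =>
    rw [List.foldl_cons]
    apply ih
    rw [keys_step, hd]
    decide

theorem A_eq_canon (l : List (Int × Int × Int)) : getpermute l = pvCanon l := by
  cases l with
  | nil => rfl
  | cons row rest =>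
    unfold getpermute
    have hkeys0 : ((PySem.List.pyRange 0 (PySem.List.len (pvSeq row)) 1).foldl
        (fun d i => d.modify i [] (fun xs => xs ++ [PySem.List.pyGetD (pvSeq row) i (0, 0, 0)]))
        (PySem.Dict.empty : PySem.Dict Int (List (Int × Int × Int)))).keys
        = PySem.List.pyRange 0 24 1 := by
      rw [keys_step]
      decide
    rw [List.foldl_cons]
    rw [PySem.Dict.items_eq_map_keys _ (by rw [keys_steps _ _ hkeys0]; decide) []]
    rw [keys_steps _ _ hkeys0]
    rw [show (PySem.List.pyRange 0 24 1 : List Int)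
          = (List.range 24).map (fun k : Nat => (k : Int)) by decide]
    rw [List.map_map, pvCanon, if_neg (List.cons_ne_nil _ _)]
    have hg : ∀ i : Nat, i < 24 →
        (rest.foldl (fun d r =>
            let lps := pvSeq r
            (PySem.List.pyRange 0 (PySem.List.len lps) 1).foldl
              (fun d i => d.modify i [] (fun xs => xs ++ [PySem.List.pyGetD lps i (0, 0, 0)])) d)
          ((PySem.List.pyRange 0 (PySem.List.len (pvSeq row)) 1).foldl
            (fun d i => d.modify i [] (fun xs => xs ++ [PySem.List.pyGetD (pvSeq row) i (0, 0, 0)]))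
            (PySem.Dict.empty : PySem.Dict Int (List (Int × Int × Int))))).getD (i : Int) []
          = pvCols (row :: rest) i := by
      intro i hi24
      have hpos : (0 : Int) ≤ (i : Int) ∧ (i : Int) < 24 := by
        constructor <;> [positivity; exact_mod_cast hi24]
      rw [getD_foldl_A, getD_step, if_pos hpos, if_pos hpos]
      simp only [PySem.Dict.getD_empty, List.nil_append, List.singleton_append,
        pvCols, List.map_cons, PySem.List.pyGetD_natCast]
    apply List.map_congr_left
    intro i hi
    simp only [Function.comp_apply, hg i (List.mem_range.mp hi)]

-- pvSeq written out: entry i of the sequence is exactly orientation i applied to v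
theorem pvSeq_explicit (a b c : Int) :
    pvSeq (a, b, c) =
      [ (a, c, -b), (-c, a, -b), (-a, -c, -b), (c, -a, -b),
        (c, -b, a), (b, c, a), (-c, b, a), (-b, -c, a),
        (-b, a, c), (-a, -b, c), (b, -a, c), (a, b, c),
        (-c, -a, b), (a, -c, b), (c, a, b), (-a, c, b),
        (-a, b, -c), (-b, -a, -c), (a, -b, -c), (b, a, -c),
        (b, -c, -a), (c, b, -a), (-b, c, -a), (-c, -b, -a) ] := by
  simp [pvSeq, pvRoll, pvTurn, show PySem.List.pyRange 0 2 1 = [0, 1] from rfl,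
        show PySem.List.pyRange 0 3 1 = [0, 1, 2] from rfl]

theorem apply_orient (i : Nat) (hi : i < 24) (v : Int × Int × Int) :
    pvApply (pvOrient.getD i default) v = (pvSeq v).getD i (0, 0, 0) := by
  obtain ⟨a, b, c⟩ := v
  rw [pvSeq_explicit]
  interval_cases i <;>
    simp [pvOrient, pvApply, pvComp, one_mul]

theorem B_eq_canon (l : List (Int × Int × Int)) : getpermute_alt l = pvCanon l := by
  cases l with
  | nil => rfl
  | cons row rest =>
    unfold getpermute_alt
    rw [if_pos (List.cons_ne_nil _ _)]
    rw [PySem.List.enumerate_eq_map_pyRange pvOrient default]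
    rw [show PySem.List.len pvOrient = ((24 : Nat) : Int) by decide,
        PySem.List.pyRange_zero_natCast, List.map_map, List.foldl_map]
    rw [PySem.Dict.items_foldl_insert_fresh (List.range 24)
        (fun k : Nat =>
          (((fun j => (j, PySem.List.pyGetD pvOrient j default)) ∘ fun k : Nat => (k : Int)) k).1)
        (fun k : Nat => (row :: rest).map (fun r => pvApply
          (((fun j => (j, PySem.List.pyGetD pvOrient j default)) ∘ fun k : Nat => (k : Int)) k).2 r))
        PySem.Dict.empty
        (by intro a _; exact PySem.Dict.contains_empty _)
        (by exact List.nodup_range.map (by intro a b hab; simpa using hab))]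
    rw [show (PySem.Dict.empty : PySem.Dict Int (List (Int × Int × Int))).items = [] from rfl,
        List.nil_append, pvCanon, if_neg (List.cons_ne_nil _ _)]
    apply List.map_congr_left
    intro i hi
    have hi24 : i < 24 := List.mem_range.mp hi
    simp only [Function.comp_apply, PySem.List.pyGetD_natCast]
    refine Prod.ext rfl ?_
    simp only [pvCols]
    exact List.map_congr_left fun r _ => apply_orient i hi24 r

-- ===== VERDICT (by name: the statement is the Claim_ definition above) =====
theorem getpermute_spec : Claim_equal_getpermute := by
  intro l _
  unfold Spec_getpermute
  rw [A_eq_canon, B_eq_canon]
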